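-- pv_equiv track=rewrite | github.com/JoshuaShinkle/COS-120 | LABS/LAB07/Lab_07_12.py | countUpperCaseWords
-- ===== SOURCE A (Python) =====
-- def countUpperCaseWords(string):
--     numUpperWords = 0
--     check = True
--     for i in range(len(string)):
--         if check == True:
--             if ord(string[i]) <= ord("Z") and ord(string[i]) >= ord("A"):
--                 numUpperWords += 1
--                 check = False
--         if string[i] == " ":
--             check = True
--     return numUpperWords
-- ===== SOURCE B (Python) =====
-- def countUpperCaseWords(string):
--     return sum(1 for word in string.split(" ")
--                if any("A" <= c <= "Z" for c in word))
-- ===== Notes on version B (the rewrite author's own statement) =====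
-- stated objective: simpler
-- what changed: Replaces the index loop with a per-character reset flag by a two-stage computation: split on the literal space, then count segments containing an ASCII uppercase letter.
import Mathlib
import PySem

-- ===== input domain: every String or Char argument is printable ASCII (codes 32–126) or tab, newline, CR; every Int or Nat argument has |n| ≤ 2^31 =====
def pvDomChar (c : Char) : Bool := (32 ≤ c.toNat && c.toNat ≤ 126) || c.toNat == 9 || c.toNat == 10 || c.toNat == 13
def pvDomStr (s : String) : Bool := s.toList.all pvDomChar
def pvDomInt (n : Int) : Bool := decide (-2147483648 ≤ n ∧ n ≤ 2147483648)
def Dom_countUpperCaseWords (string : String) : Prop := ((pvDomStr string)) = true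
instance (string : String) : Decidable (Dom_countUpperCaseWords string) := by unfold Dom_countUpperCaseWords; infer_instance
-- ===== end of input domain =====

-- B replaces A's single-pass uppercase/reset flag with split-on-space then count segments containing an ASCII uppercase letter (simpler decomposition).


-- ===== PORT A =====
-- A's for-loop over the characters (range(len) indexing visits them in order),
-- carried state = (numUpperWords, check); branch order as in the Python.
def pvALoop : List Char → Int → Bool → Int
  | [], n, _ => n
  | c :: rest, n, check =>
    let p : Int × Bool :=
      if check = true then
        (if c.toNat ≤ ('Z').toNat && ('A').toNat ≤ c.toNat then (n + 1, false) else (n, check))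
      else (n, check)
    let check' := if c = ' ' then true else p.2
    pvALoop rest p.1 check'

def countUpperCaseWords (string : String) : Int := pvALoop string.toList 0 true

-- ===== PORT B =====
-- word contains an ASCII uppercase letter: any("A" <= c <= "Z" for c in word)
def pvHasUpper (w : List Char) : Bool := w.any (fun c => decide ('A' ≤ c) && decide (c ≤ 'Z'))

-- string.split(" ") with the nonempty literal separator is PySem.Chars.splitOn;
-- sum(1 for word in … if pvHasUpper word) is countP.
def countUpperCaseWords_alt (string : String) : Int :=
  ((PySem.Chars.splitOn string.toList [' ']).countP pvHasUpper : Nat)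

-- ===== PRECONDITION & SPEC =====
def Spec_countUpperCaseWords (string : String) (out : Int) : Prop := out = countUpperCaseWords_alt string
instance (string : String) (out : Int) : Decidable (Spec_countUpperCaseWords string out) := by unfold Spec_countUpperCaseWords; infer_instance

-- ===== CLAIM (what is proved, stated in full; the proofs are below) =====
def Claim_equal_countUpperCaseWords : Prop := ∀ (string : String), Dom_countUpperCaseWords string → Spec_countUpperCaseWords string (countUpperCaseWords string)

-- ===== LEMMAS AND PROOFS =====

-- split-on-a-single-space, accumulator form (proof helper)
def pvSplit : List Char → List Char → List (List Char)
  | [], cur => [cur.reverse]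
  | c :: rest, cur => if c = ' ' then cur.reverse :: pvSplit rest [] else pvSplit rest (c :: cur)

theorem pvGo_eq (l : List Char) : ∀ (fuel : Nat) (cur : List Char) (acc : List (List Char)),
    l.length ≤ fuel →
    PySem.Chars.splitOn.go [' '] fuel l cur acc = acc.reverse ++ pvSplit l cur := by
  induction l with
  | nil => intro fuel cur acc _; cases fuel <;> simp [PySem.Chars.splitOn.go, pvSplit]
  | cons c rest ih =>
    intro fuel cur acc h
    cases fuel with
    | zero => simp at h
    | succ f =>
      have hf : rest.length ≤ f := by simpa using Nat.le_of_succ_le_succ h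
      by_cases hc : c = ' '
      · subst hc
        simp only [PySem.Chars.splitOn.go, List.isPrefixOf, pvSplit, beq_self_eq_true,
          Bool.true_and, if_pos rfl, if_true, List.length_cons, List.length_nil,
          Nat.zero_add, List.drop_succ_cons, List.drop_zero]
        rw [ih f [] (cur.reverse :: acc) hf]
        simp
      · have hne : (' ' == c) = false := by
          simp [beq_eq_false_iff_ne]; exact fun h' => hc h'.symm
        simp only [PySem.Chars.splitOn.go, List.isPrefixOf, pvSplit, hne, Bool.false_and,
          Bool.false_eq_true, if_false, if_neg hc]
        exact ih f (c :: cur) acc hf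

theorem pvSplitOn_eq (l : List Char) : PySem.Chars.splitOn l [' '] = pvSplit l [] := by
  have := pvGo_eq l (l.length + 1) [] [] (by omega)
  simpa [PySem.Chars.splitOn] using this

theorem pvUpA_eq (c : Char) :
    (c.toNat ≤ ('Z').toNat && ('A').toNat ≤ c.toNat) = (decide ('A' ≤ c) && decide (c ≤ 'Z')) := by
  simp only [Char.le_def, UInt32.le_iff_toNat_le, Char.toNat]
  rw [Bool.and_comm]
  rfl

theorem pvHasUpper_nil : pvHasUpper [] = false := rfl

theorem pvHasUpper_reverse (cur : List Char) : pvHasUpper cur.reverse = pvHasUpper cur := by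
  simp [pvHasUpper]

theorem pvHasUpper_cons (c : Char) (cur : List Char) :
    pvHasUpper (c :: cur) = ((decide ('A' ≤ c) && decide (c ≤ 'Z')) || pvHasUpper cur) := by
  simp [pvHasUpper]

theorem pvKey (l : List Char) : ∀ (cur : List Char) (n : Int),
    pvALoop l n (!(pvHasUpper cur)) + (if pvHasUpper cur then (1 : Int) else 0) =
      n + ((pvSplit l cur).countP pvHasUpper : Nat) := by
  induction l with
  | nil =>
    intro cur n
    simp only [pvALoop, pvSplit, List.countP_cons, List.countP_nil, pvHasUpper_reverse]
    by_cases h : pvHasUpper cur <;> simp [h]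
  | cons c rest ih =>
    intro cur n
    simp only [pvALoop, pvSplit, pvUpA_eq]
    by_cases hc : c = ' '
    · subst hc
      have hnup : (decide ('A' ≤ ' ') && decide (' ' ≤ 'Z')) = false := by decide
      have hIH := ih [] n
      simp only [pvHasUpper_nil, Bool.not_false, Bool.false_eq_true, if_false, ite_false,
        add_zero] at hIH
      simp only [hnup, Bool.false_eq_true, if_false, ite_self, if_pos rfl,
        List.countP_cons, pvHasUpper_reverse]
      by_cases h : pvHasUpper cur <;> simp [h, List.countP_cons, pvHasUpper_reverse] <;>
        push_cast <;> omega
    · simp only [if_neg hc]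
      by_cases hup : (decide ('A' ≤ c) && decide (c ≤ 'Z')) = true
      · have h' : pvHasUpper (c :: cur) = true := by rw [pvHasUpper_cons, hup]; simp
        by_cases h : pvHasUpper cur
        · have hIH := ih (c :: cur) n
          simp only [h, h', Bool.not_true, Bool.false_eq_true, if_false, ite_true,
            ite_self] at hIH ⊢
          exact hIH
        · have hIH := ih (c :: cur) (n + 1)
          simp only [h, h', eq_false_of_ne_true h, Bool.not_true, Bool.not_false,
            Bool.false_eq_true, if_false, if_true, ite_true, ite_false, hup] at hIH ⊢
          omega
      · have hup' : (decide ('A' ≤ c) && decide (c ≤ 'Z')) = false := eq_false_of_ne_true hup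
        have h' : pvHasUpper (c :: cur) = pvHasUpper cur := by
          rw [pvHasUpper_cons, hup']; simp
        have hIH := ih (c :: cur) n
        rw [h'] at hIH
        by_cases h : pvHasUpper cur
        · simpa [h] using hIH
        · simp only [eq_false_of_ne_true h, hup', Bool.not_false, Bool.false_eq_true,
            if_false, if_true, ite_false, ite_self] at hIH ⊢
          exact hIH

-- ===== VERDICT (by name: the statement is the Claim_ definition above) =====
theorem countUpperCaseWords_spec : Claim_equal_countUpperCaseWords := by
  intro s _
  show countUpperCaseWords s = countUpperCaseWords_alt s
  have hk := pvKey s.toList [] 0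
  simp only [pvHasUpper_nil, Bool.not_false, Bool.false_eq_true, if_false, ite_false,
    add_zero, zero_add] at hk
  simp only [countUpperCaseWords, countUpperCaseWords_alt, pvSplitOn_eq]
  omega
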